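-- pv_equiv track=rewrite | github.com/20q2/mtgenesis.ai | proxy-server/card_renderer.py | sort_colors_for_pipes
-- ===== SOURCE A (Python) =====
-- from typing import Dict, List, Optional, Tuple
--
-- def sort_colors_for_pipes(colors: List[str]) -> List[str]:
--     """Sort colors for pipe display - ensure proper visual ordering for common combinations"""
--     if len(colors) != 2:
--         return colors
--
--     # Common two-color guild pairings with preferred left-right visual ordering
--     guild_orders = {
--         # Allied colors (adjacent on color pie) - traditional left-right ordering
--         ('W', 'U'): ['W', 'U'],  # Azorius: White left, Blue right
--         ('U', 'B'): ['U', 'B'],  # Dimir: Blue left, Black right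
--         ('B', 'R'): ['B', 'R'],  # Rakdos: Black left, Red right
--         ('R', 'G'): ['R', 'G'],  # Gruul: Red left, Green right
--         ('G', 'W'): ['G', 'W'],  # Selesnya: Green left, White right
--
--         # Enemy colors (opposite on color pie) - visual preference ordering
--         ('W', 'B'): ['W', 'B'],  # Orzhov: White left, Black right
--         ('U', 'R'): ['U', 'R'],  # Izzet: Blue left, Red right
--         ('B', 'G'): ['B', 'G'],  # Golgari: Black left, Green right
--         ('R', 'W'): ['R', 'W'],  # Boros: Red left, White right
--         ('G', 'U'): ['G', 'U'],  # Simic: Green left, Blue right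
--     }
--
--     # Try both orders to find match
--     colors_set = set(colors)
--     for (c1, c2), preferred_order in guild_orders.items():
--         if colors_set == {c1, c2}:
--             return preferred_order
--
--     # Fallback to WUBRG order if no specific guild match
--     wubrg_order = ['W', 'U', 'B', 'R', 'G']
--     result = [color for color in wubrg_order if color in colors]
--     return result
-- ===== SOURCE B (Python) =====
-- from typing import Dict, List, Optional, Tuple
--
-- # WUBRG color wheel as a list; position arithmetic replaces any pair table.
-- _WHEEL = ['W', 'U', 'B', 'R', 'G']
--
-- def sort_colors_for_pipes(colors: List[str]) -> List[str]:
--     """Sort colors for pipe display - ensure proper visual ordering for common combinations"""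
--     if len(colors) != 2:
--         return colors
--     a, b = colors
--     if a in _WHEEL and b in _WHEEL:
--         # Preferred guild orderings are exactly the pairs 1 or 2 steps clockwise
--         # around the WUBRG color wheel.
--         d = (_WHEEL.index(b) - _WHEEL.index(a)) % 5
--         if d in (1, 2):
--             return [a, b]
--         if d in (3, 4):
--             return [b, a]
--         # d == 0: duplicate color, fall through
--     return [c for c in _WHEEL if c in colors]
-- ===== Notes on version B (the rewrite author's own statement) =====
-- stated objective: alternative
-- what changed: Replaces the 10-entry guild table entirely with color-wheel arithmetic: each color's WUBRG index is taken and the pair is kept iff the clockwise distance (j-i) mod 5 is 1 or 2, swapped iff 3 or 4; only duplicates or non-colors reach the same WUBRG-filter fallback.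
import Mathlib
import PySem

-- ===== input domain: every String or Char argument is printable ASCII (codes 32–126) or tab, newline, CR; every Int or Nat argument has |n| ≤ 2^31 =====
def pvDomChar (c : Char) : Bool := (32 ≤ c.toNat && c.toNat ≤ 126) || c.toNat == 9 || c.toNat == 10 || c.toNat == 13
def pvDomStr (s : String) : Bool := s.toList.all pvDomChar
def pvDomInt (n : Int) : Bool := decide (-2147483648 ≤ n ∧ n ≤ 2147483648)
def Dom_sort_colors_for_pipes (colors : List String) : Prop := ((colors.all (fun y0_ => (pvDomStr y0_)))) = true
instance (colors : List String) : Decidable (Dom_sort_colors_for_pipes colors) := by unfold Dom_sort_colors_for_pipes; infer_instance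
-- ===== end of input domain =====

-- B replaces A's 10-entry guild table and set-equality loop with color-wheel arithmetic: keep the pair iff (index b - index a) mod 5 is 1 or 2, swap iff 3 or 4; same WUBRG-filter fallback only for duplicates/non-colors (objective: alternative).


-- ===== PORT A =====
-- the guild_orders dict as its (key, value) items in insertion order
def guildItems : List ((String × String) × List String) :=
  [ (("W","U"), ["W","U"]), (("U","B"), ["U","B"]), (("B","R"), ["B","R"]),
    (("R","G"), ["R","G"]), (("G","W"), ["G","W"]),
    (("W","B"), ["W","B"]), (("U","R"), ["U","R"]), (("B","G"), ["B","G"]),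
    (("R","W"), ["R","W"]), (("G","U"), ["G","U"]) ]

-- the 'for (c1, c2), preferred_order in guild_orders.items()' loop with its early return
def guildLoop (colors_set : PySem.Set String) :
    List ((String × String) × List String) → Option (List String)
  | [] => none
  | ((c1, c2), pref) :: rest =>
    if PySem.Set.equal colors_set (PySem.Set.ofList [c1, c2]) then some pref
    else guildLoop colors_set rest

def sort_colors_for_pipes (colors : List String) : List String :=
  if colors.length ≠ 2 then colors
  else
    let colors_set := PySem.Set.ofList colors
    match guildLoop colors_set guildItems with
    | some pref => pref
    | none => ["W","U","B","R","G"].filter (fun c => colors.contains c)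

-- ===== PORT B =====
def wheel : List String := ["W", "U", "B", "R", "G"]

def sort_colors_for_pipes_alt (colors : List String) : List String :=
  if colors.length ≠ 2 then colors
  else
    match colors with
    | [a, b] =>
      if wheel.contains a && wheel.contains b then
        -- both indexes exist because of the membership guard ('a, b in _WHEEL')
        match PySem.List.index? wheel a, PySem.List.index? wheel b with
        | some ia, some ib =>
          let d := PySem.Int.mod ((ib : Int) - (ia : Int)) 5
          if d = 1 ∨ d = 2 then [a, b]
          else if d = 3 ∨ d = 4 then [b, a]
          else wheel.filter (fun c => colors.contains c)   -- d = 0: duplicate color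
        | _, _ => wheel.filter (fun c => colors.contains c)  -- unreachable under the guard
      else wheel.filter (fun c => colors.contains c)
    | _ => colors  -- unreachable: length = 2 ('a, b = colors' always succeeds past the guard)

-- ===== PRECONDITION & SPEC =====
def Spec_sort_colors_for_pipes (colors : List String) (out : List String) : Prop := out = sort_colors_for_pipes_alt colors
instance (colors : List String) (out : List String) : Decidable (Spec_sort_colors_for_pipes colors out) := by unfold Spec_sort_colors_for_pipes; infer_instance

-- ===== CLAIM =====
def Claim_equal_sort_colors_for_pipes : Prop := ∀ (colors : List String), Dom_sort_colors_for_pipes colors → Spec_sort_colors_for_pipes colors (sort_colors_for_pipes colors)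

-- ===== LEMMAS AND PROOFS =====

-- every string is one of the five color letters or none of them
theorem string_key (s : String) : s = "W" ∨ s = "U" ∨ s = "B" ∨ s = "R" ∨ s = "G" ∨
    (s ≠ "W" ∧ s ≠ "U" ∧ s ≠ "B" ∧ s ≠ "R" ∧ s ≠ "G") := by
  by_cases h1 : s = "W" <;> by_cases h2 : s = "U" <;> by_cases h3 : s = "B" <;>
    by_cases h4 : s = "R" <;> by_cases h5 : s = "G" <;> tauto

-- Python's {a,b} == {c1,c2} for distinct c1 c2 holds iff the ordered pair matches one way or the other
theorem pair_equal_iff (a b c1 c2 : String) (h : c1 ≠ c2) :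
    (PySem.Set.equal (PySem.Set.ofList [a, b]) (PySem.Set.ofList [c1, c2]) = true)
      ↔ ((a = c1 ∧ b = c2) ∨ (a = c2 ∧ b = c1)) := by
  rw [PySem.Set.equal_iff]
  constructor
  · intro H
    have h1 := (H c1).mpr (by simp [PySem.Set.mem_ofList])
    have h2 := (H c2).mpr (by simp [PySem.Set.mem_ofList])
    have h3 := (H a).mp (by simp [PySem.Set.mem_ofList])
    have h4 := (H b).mp (by simp [PySem.Set.mem_ofList])
    simp [PySem.Set.mem_ofList] at h1 h2 h3 h4
    rcases h1 with h1 | h1 <;> rcases h2 with h2 | h2 <;> tauto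
  · intro H x
    simp only [PySem.Set.mem_ofList, List.mem_cons, List.not_mem_nil, or_false]
    rcases H with ⟨rfl, rfl⟩ | ⟨rfl, rfl⟩ <;> tauto

theorem eq_WU (a b : String) :
    (PySem.Set.equal (PySem.Set.ofList [a, b]) (PySem.Set.ofList ["W", "U"]) = true)
      ↔ ((a = "W" ∧ b = "U") ∨ (a = "U" ∧ b = "W")) :=
  pair_equal_iff a b "W" "U" (by decide)

theorem eq_UB (a b : String) :
    (PySem.Set.equal (PySem.Set.ofList [a, b]) (PySem.Set.ofList ["U", "B"]) = true)
      ↔ ((a = "U" ∧ b = "B") ∨ (a = "B" ∧ b = "U")) :=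
  pair_equal_iff a b "U" "B" (by decide)

theorem eq_BR (a b : String) :
    (PySem.Set.equal (PySem.Set.ofList [a, b]) (PySem.Set.ofList ["B", "R"]) = true)
      ↔ ((a = "B" ∧ b = "R") ∨ (a = "R" ∧ b = "B")) :=
  pair_equal_iff a b "B" "R" (by decide)

theorem eq_RG (a b : String) :
    (PySem.Set.equal (PySem.Set.ofList [a, b]) (PySem.Set.ofList ["R", "G"]) = true)
      ↔ ((a = "R" ∧ b = "G") ∨ (a = "G" ∧ b = "R")) :=
  pair_equal_iff a b "R" "G" (by decide)

theorem eq_GW (a b : String) :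
    (PySem.Set.equal (PySem.Set.ofList [a, b]) (PySem.Set.ofList ["G", "W"]) = true)
      ↔ ((a = "G" ∧ b = "W") ∨ (a = "W" ∧ b = "G")) :=
  pair_equal_iff a b "G" "W" (by decide)

theorem eq_WB (a b : String) :
    (PySem.Set.equal (PySem.Set.ofList [a, b]) (PySem.Set.ofList ["W", "B"]) = true)
      ↔ ((a = "W" ∧ b = "B") ∨ (a = "B" ∧ b = "W")) :=
  pair_equal_iff a b "W" "B" (by decide)

theorem eq_UR (a b : String) :
    (PySem.Set.equal (PySem.Set.ofList [a, b]) (PySem.Set.ofList ["U", "R"]) = true)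
      ↔ ((a = "U" ∧ b = "R") ∨ (a = "R" ∧ b = "U")) :=
  pair_equal_iff a b "U" "R" (by decide)

theorem eq_BG (a b : String) :
    (PySem.Set.equal (PySem.Set.ofList [a, b]) (PySem.Set.ofList ["B", "G"]) = true)
      ↔ ((a = "B" ∧ b = "G") ∨ (a = "G" ∧ b = "B")) :=
  pair_equal_iff a b "B" "G" (by decide)

theorem eq_RW (a b : String) :
    (PySem.Set.equal (PySem.Set.ofList [a, b]) (PySem.Set.ofList ["R", "W"]) = true)
      ↔ ((a = "R" ∧ b = "W") ∨ (a = "W" ∧ b = "R")) :=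
  pair_equal_iff a b "R" "W" (by decide)

theorem eq_GU (a b : String) :
    (PySem.Set.equal (PySem.Set.ofList [a, b]) (PySem.Set.ofList ["G", "U"]) = true)
      ↔ ((a = "G" ∧ b = "U") ∨ (a = "U" ∧ b = "G")) :=
  pair_equal_iff a b "G" "U" (by decide)

set_option maxHeartbeats 1000000 in
theorem main_pair (a b : String) :
    sort_colors_for_pipes [a, b] = sort_colors_for_pipes_alt [a, b] := by
  rcases string_key a with rfl | rfl | rfl | rfl | rfl | ⟨ha1, ha2, ha3, ha4, ha5⟩ <;>
    rcases string_key b with rfl | rfl | rfl | rfl | rfl | ⟨hb1, hb2, hb3, hb4, hb5⟩ <;>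
  · first
    | decide
    | (simp only [sort_colors_for_pipes, sort_colors_for_pipes_alt, guildItems, guildLoop,
        eq_WU, eq_UB, eq_BR, eq_RG, eq_GW, eq_WB, eq_UR, eq_BG, eq_RW, eq_GU, wheel]
       simp_all)

-- ===== VERDICT =====
theorem sort_colors_for_pipes_spec : Claim_equal_sort_colors_for_pipes := by
  intro colors _
  unfold Spec_sort_colors_for_pipes
  match colors with
  | [] => rfl
  | [a] => rfl
  | [a, b] => exact main_pair a b
  | a :: b :: c :: t =>
    have h : (a :: b :: c :: t).length ≠ 2 := by simp
    simp [sort_colors_for_pipes, sort_colors_for_pipes_alt]
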